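-- pv_equiv track=rewrite | github.com/MFGLife/salmonaudit | apps/warehouse/warehouse_detect.py | generate_inventory_list
-- ===== SOURCE A (Python) =====
-- GRID_SIZE = 5  # 5x5 grid
--
-- def generate_inventory_list(grid_status):
--     """Create sorted list of items"""
--     yellow_items = []
--     red_items = []
--
--     for (row, col), status in grid_status.items():
--         cell_number = row * GRID_SIZE + col + 1  # 1-based numbering
--         if status == 'yellow':
--             yellow_items.append(cell_number)
--         elif status == 'red':
--             red_items.append(cell_number)
--
--     # Sort items
--     yellow_items.sort()
--     red_items.sort()
--
--     return yellow_items, red_items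
-- ===== SOURCE B (Python) =====
-- GRID_SIZE = 5  # 5x5 grid
--
-- def _insort(items, x):
--     """Insert x into the already-sorted list items, keeping it sorted."""
--     for i, v in enumerate(items):
--         if x <= v:
--             items.insert(i, x)
--             return
--     items.append(x)
--
-- def generate_inventory_list(grid_status):
--     """Create sorted list of items"""
--     yellow_items = []
--     red_items = []
--     for (row, col), status in grid_status.items():
--         cell_number = row * GRID_SIZE + col + 1  # 1-based numbering
--         if status == 'yellow':
--             _insort(yellow_items, cell_number)
--         elif status == 'red':
--             _insort(red_items, cell_number)
--     return yellow_items, red_items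
-- ===== Notes on version B (the rewrite author's own statement) =====
-- stated objective: alternative
-- what changed: B never calls sort: it keeps both output lists sorted as invariants, binary-partitioning each cell into its list by an ordered insertion (insertion sort interleaved with the single pass), so no separate sorting phase exists.
import Mathlib
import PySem

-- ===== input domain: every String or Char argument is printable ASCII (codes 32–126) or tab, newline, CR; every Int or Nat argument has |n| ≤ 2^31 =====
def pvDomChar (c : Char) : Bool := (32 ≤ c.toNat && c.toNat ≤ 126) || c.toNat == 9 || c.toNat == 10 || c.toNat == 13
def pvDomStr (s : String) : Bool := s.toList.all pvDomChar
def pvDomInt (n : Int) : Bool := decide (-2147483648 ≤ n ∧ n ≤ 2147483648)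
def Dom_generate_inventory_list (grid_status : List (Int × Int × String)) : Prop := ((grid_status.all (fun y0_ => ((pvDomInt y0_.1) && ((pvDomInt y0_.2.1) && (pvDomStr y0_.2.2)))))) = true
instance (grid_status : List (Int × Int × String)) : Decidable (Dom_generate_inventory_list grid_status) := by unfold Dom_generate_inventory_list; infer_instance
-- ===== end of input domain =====

-- B keeps both output lists sorted throughout by ordered insertion during the single pass
-- (no sort calls), instead of A's append-then-sort; alternative decomposition, same result.


-- ===== PORT A =====
-- the dict[tuple[int,int], str] argument arrives as an assoc list; Python builds the dict
-- (first-insertion position, last value wins) — modelled exactly by PySem.Dict.ofList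
def pvDictOf (grid_status : List (Int × Int × String)) : PySem.Dict (Int × Int) String :=
  PySem.Dict.ofList (grid_status.map (fun t => ((t.1, t.2.1), t.2.2)))

def generate_inventory_list (grid_status : List (Int × Int × String)) : List Int × List Int :=
  let d := pvDictOf grid_status
  let yr := d.items.foldl (fun (acc : List Int × List Int) kv =>
      let cell_number := kv.1.1 * 5 + kv.1.2 + 1
      if kv.2 = "yellow" then (acc.1 ++ [cell_number], acc.2)
      else if kv.2 = "red" then (acc.1, acc.2 ++ [cell_number])
      else acc) ([], [])
  (PySem.List.sorted yr.1 (fun x => x) false, PySem.List.sorted yr.2 (fun x => x) false)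

-- ===== PORT B =====
-- _insort: insert x before the first element ≥ x, keeping the list sorted
def pvInsort (x : Int) : List Int → List Int
  | [] => [x]
  | v :: t => if x ≤ v then x :: v :: t else v :: pvInsort x t

def generate_inventory_list_alt (grid_status : List (Int × Int × String)) : List Int × List Int :=
  let d := pvDictOf grid_status
  d.items.foldl (fun (acc : List Int × List Int) kv =>
      let cell_number := kv.1.1 * 5 + kv.1.2 + 1
      if kv.2 = "yellow" then (pvInsort cell_number acc.1, acc.2)
      else if kv.2 = "red" then (acc.1, pvInsort cell_number acc.2)
      else acc) (([] : List Int), ([] : List Int))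

-- ===== PRECONDITION & SPEC =====
def Spec_generate_inventory_list (grid_status : List (Int × Int × String)) (out : List Int × List Int) : Prop := out = generate_inventory_list_alt grid_status
instance (grid_status : List (Int × Int × String)) (out : List Int × List Int) : Decidable (Spec_generate_inventory_list grid_status out) := by unfold Spec_generate_inventory_list; infer_instance

-- ===== CLAIM (what is proved, stated in full; the proofs are below) =====
def Claim_equal_generate_inventory_list : Prop := ∀ (grid_status : List (Int × Int × String)), Dom_generate_inventory_list grid_status → Spec_generate_inventory_list grid_status (generate_inventory_list grid_status)

-- ===== LEMMAS AND PROOFS =====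

theorem pvInsort_perm (x : Int) (l : List Int) : (pvInsort x l).Perm (x :: l) := by
  induction l with
  | nil => simp [pvInsort]
  | cons v t ih =>
    simp only [pvInsort]
    split_ifs
    · exact List.Perm.refl _
    · exact ((ih.cons v).trans (List.Perm.swap x v t))

theorem pvInsort_pairwise (x : Int) (l : List Int) (h : l.Pairwise (· ≤ ·)) :
    (pvInsort x l).Pairwise (· ≤ ·) := by
  induction l with
  | nil => simp [pvInsort]
  | cons v t ih =>
    simp only [pvInsort]
    rcases List.pairwise_cons.mp h with ⟨hv, ht⟩
    split_ifs with hx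
    · refine List.pairwise_cons.mpr ⟨?_, h⟩
      intro b hb
      rcases List.mem_cons.mp hb with rfl | hb
      · exact hx
      · exact le_trans hx (hv _ hb)
    · refine List.pairwise_cons.mpr ⟨?_, ih ht⟩
      intro b hb
      rcases List.mem_cons.mp ((pvInsort_perm x t).mem_iff.mp hb) with rfl | h2
      · omega
      · exact hv _ h2

-- A's partition loop, characterised as two filters
theorem partition_fold (l : List ((Int × Int) × String)) (a b : List Int) :
    l.foldl (fun (acc : List Int × List Int) kv =>
      let cell_number := kv.1.1 * 5 + kv.1.2 + 1
      if kv.2 = "yellow" then (acc.1 ++ [cell_number], acc.2)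
      else if kv.2 = "red" then (acc.1, acc.2 ++ [cell_number])
      else acc) (a, b)
    = (a ++ ((l.filter (fun kv => kv.2 == "yellow")).map (fun kv => kv.1.1 * 5 + kv.1.2 + 1)),
       b ++ ((l.filter (fun kv => kv.2 == "red")).map (fun kv => kv.1.1 * 5 + kv.1.2 + 1))) := by
  induction l generalizing a b with
  | nil => simp
  | cons h t ih =>
    simp only [List.foldl_cons, List.filter_cons]
    by_cases hy : h.2 = "yellow"
    · simp [hy, ih, List.append_assoc]
    · by_cases hr : h.2 = "red" <;> simp [hy, hr, ih, List.append_assoc]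

-- B's loop, characterised componentwise as insertion folds over the same filters
theorem insort_fold (l : List ((Int × Int) × String)) (a b : List Int) :
    l.foldl (fun (acc : List Int × List Int) kv =>
      let cell_number := kv.1.1 * 5 + kv.1.2 + 1
      if kv.2 = "yellow" then (pvInsort cell_number acc.1, acc.2)
      else if kv.2 = "red" then (acc.1, pvInsort cell_number acc.2)
      else acc) (a, b)
    = (((l.filter (fun kv => kv.2 == "yellow")).map (fun kv => kv.1.1 * 5 + kv.1.2 + 1)).foldl
          (fun acc x => pvInsort x acc) a,
       ((l.filter (fun kv => kv.2 == "red")).map (fun kv => kv.1.1 * 5 + kv.1.2 + 1)).foldl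
          (fun acc x => pvInsort x acc) b) := by
  induction l generalizing a b with
  | nil => simp
  | cons h t ih =>
    simp only [List.foldl_cons, List.filter_cons]
    by_cases hy : h.2 = "yellow"
    · simp [hy, ih]
    · by_cases hr : h.2 = "red" <;> simp [hy, hr, ih]

theorem foldl_insort_perm (l : List Int) (a : List Int) :
    (l.foldl (fun acc x => pvInsort x acc) a).Perm (a ++ l) := by
  induction l generalizing a with
  | nil => simp
  | cons x t ih =>
    simp only [List.foldl_cons]
    refine (ih (pvInsort x a)).trans ?_
    exact ((pvInsort_perm x a).append_right t).trans (by simpa using (List.perm_middle).symm)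

theorem foldl_insort_pairwise (l : List Int) (a : List Int) (h : a.Pairwise (· ≤ ·)) :
    (l.foldl (fun acc x => pvInsort x acc) a).Pairwise (· ≤ ·) := by
  induction l generalizing a with
  | nil => exact h
  | cons x t ih => exact ih _ (pvInsort_pairwise x a h)

theorem sorted_eq_foldl_insort (l : List Int) :
    PySem.List.sorted l (fun x => x) false = l.foldl (fun acc x => pvInsort x acc) [] := by
  apply PySem.List.sorted_id_eq_of_perm_of_pairwise
  · simpa using foldl_insort_perm l []
  · exact foldl_insort_pairwise l [] (by simp)

-- ===== VERDICT (by name: the statement is the Claim_ definition above) =====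
theorem generate_inventory_list_spec : Claim_equal_generate_inventory_list := by
  intro grid_status _
  unfold Spec_generate_inventory_list generate_inventory_list generate_inventory_list_alt
  simp only [partition_fold, insort_fold, List.nil_append, sorted_eq_foldl_insort]
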